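-- pv_equiv track=rewrite | github.com/NoteXYX/myCNN_RNN_attention | tools.py | getKeyphraseList_top
-- ===== SOURCE A (Python) =====
-- def getKeyphraseList_top(l, top_num):
--     res, now= [], []
--     singleKW = []
--     moreKP = []
--     for i in range(len(l)):
--         if l[i] != 0:
--             now.append(str(i))
--         if l[i] == 0 or i == len(l) - 1:
--             if len(now) != 0:
--                 res.append(' '.join(now))
--                 if len(now) == 1:
--                     singleKW.append(now[0])
--                 else:
--                     moreKP.append(' '.join(now))
--                 if len(res) >= top_num:
--                     break
--             now = []
--     return set(res), set(singleKW), set(moreKP)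
-- ===== SOURCE B (Python) =====
-- def getKeyphraseList_top(l, top_num):
--     # Phase 1: extract runs of consecutive non-zero positions as lists of str(index).
--     runs = []
--     cur = None
--     for i, v in enumerate(l):
--         if v != 0:
--             if cur is None:
--                 cur = [str(i)]
--                 runs.append(cur)
--             else:
--                 cur.append(str(i))
--         else:
--             cur = None
--     # Phase 2: classify the runs in order, stopping once top_num phrases are collected.
--     res, singleKW, moreKP = [], [], []
--     for run in runs:
--         phrase = ' '.join(run)
--         res.append(phrase)
--         if len(run) == 1:
--             singleKW.append(run[0])
--         else:
--             moreKP.append(phrase)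
--         if len(res) >= top_num:
--             break
--     return set(res), set(singleKW), set(moreKP)
-- ===== Notes on version B (the rewrite author's own statement) =====
-- stated objective: alternative
-- what changed: Replaces A's inline now-buffer state machine (flush-and-maybe-break inside one index loop) with a two-phase decomposition: first extract all non-zero index runs, then classify/truncate them in a separate loop.
import Mathlib
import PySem

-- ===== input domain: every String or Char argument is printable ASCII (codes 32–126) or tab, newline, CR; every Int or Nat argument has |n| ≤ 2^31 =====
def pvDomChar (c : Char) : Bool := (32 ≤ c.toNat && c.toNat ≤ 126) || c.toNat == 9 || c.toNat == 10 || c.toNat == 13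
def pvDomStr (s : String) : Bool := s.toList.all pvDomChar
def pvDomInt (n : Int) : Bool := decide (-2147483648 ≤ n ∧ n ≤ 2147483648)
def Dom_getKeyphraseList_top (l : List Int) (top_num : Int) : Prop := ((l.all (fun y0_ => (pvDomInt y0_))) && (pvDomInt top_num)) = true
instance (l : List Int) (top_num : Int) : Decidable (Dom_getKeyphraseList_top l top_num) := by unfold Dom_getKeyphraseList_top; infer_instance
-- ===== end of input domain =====

-- B replaces A's inline now-buffer state machine with a two-phase decomposition
-- (extract index runs, then classify/truncate); alternative, same cost.

-- ===== PORT A =====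
-- A's single for-loop over range(len(l)) with the 'now' buffer, flush and break.
def goA (l : List Int) (top_num : Int) (i : Nat) (res now single more : List String) :
    List String × List String × List String :=
  if h : i < l.length then
    let now := if l.getD i 0 ≠ 0 then now ++ [PySem.Int.toStr (i : Int)] else now
    if l.getD i 0 = 0 ∨ i = l.length - 1 then
      if now ≠ [] then
        let phrase := PySem.Str.join " " now
        let res' := res ++ [phrase]
        let single' := if now.length = 1 then single ++ [now.headD ""] else single
        let more' := if now.length = 1 then more else more ++ [phrase]
        if (res'.length : Int) ≥ top_num then (res', single', more')
        else goA l top_num (i + 1) res' [] single' more'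
      else goA l top_num (i + 1) res [] single more
    else goA l top_num (i + 1) res now single more
  else (res, single, more)
termination_by l.length - i

def getKeyphraseList_top (l : List Int) (top_num : Int) : List String × List String × List String :=
  let (res, single, more) := goA l top_num 0 [] [] [] []
  (PySem.Set.ofList res, PySem.Set.ofList single, PySem.Set.ofList more)

-- ===== PORT B =====
-- Phase 1 of B: runs of str(index) for consecutive non-zero positions.
def runsB : List Int → Nat → List String → List (List String)
  | [], _, cur => if cur = [] then [] else [cur]
  | v :: rest, i, cur =>
    if v ≠ 0 then runsB rest (i + 1) (cur ++ [PySem.Int.toStr (i : Int)])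
    else (if cur = [] then [] else [cur]) ++ runsB rest (i + 1) []

-- Phase 2 of B: classify runs in order, stop once top_num phrases collected.
def takeRunsB (top_num : Int) : List (List String) → List String → List String → List String →
    List String × List String × List String
  | [], res, single, more => (res, single, more)
  | run :: rest, res, single, more =>
    let phrase := PySem.Str.join " " run
    let res' := res ++ [phrase]
    let single' := if run.length = 1 then single ++ [run.headD ""] else single
    let more' := if run.length = 1 then more else more ++ [phrase]
    if (res'.length : Int) ≥ top_num then (res', single', more')
    else takeRunsB top_num rest res' single' more'

def getKeyphraseList_top_alt (l : List Int) (top_num : Int) : List String × List String × List String :=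
  let (res, single, more) := takeRunsB top_num (runsB l 0 []) [] [] []
  (PySem.Set.ofList res, PySem.Set.ofList single, PySem.Set.ofList more)

-- ===== PRECONDITION & SPEC =====
def Spec_getKeyphraseList_top (l : List Int) (top_num : Int) (out : List String × List String × List String) : Prop := out = getKeyphraseList_top_alt l top_num
instance (l : List Int) (top_num : Int) (out : List String × List String × List String) : Decidable (Spec_getKeyphraseList_top l top_num out) := by unfold Spec_getKeyphraseList_top; infer_instance

-- ===== CLAIM (what is proved, stated in full; the proofs are below) =====
def Claim_equal_getKeyphraseList_top : Prop := ∀ (l : List Int) (top_num : Int), Dom_getKeyphraseList_top l top_num → Spec_getKeyphraseList_top l top_num (getKeyphraseList_top l top_num)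

-- ===== LEMMAS AND PROOFS =====

-- A's loop from index i, with buffer `now`, computes B's phase 2 over the runs of
-- the suffix l.drop i (phase 1 seeded with `now`); side condition: at the very end
-- of the list the buffer is empty.
theorem goA_eq_takeRunsB (l : List Int) (top_num : Int) :
    ∀ (rest : List Int) (i : Nat) (res now single more : List String),
      l.drop i = rest → (rest = [] → now = []) →
      goA l top_num i res now single more = takeRunsB top_num (runsB rest i now) res single more := by
  intro rest
  induction rest with
  | nil =>
    intro i res now single more hdrop hnow
    have hlen : l.length ≤ i := by
      have := List.drop_eq_nil_iff.mp hdrop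
      omega
    rw [goA]
    simp [Nat.not_lt.mpr hlen, runsB, hnow rfl, takeRunsB]
  | cons v rest' ih =>
    intro i res now single more hdrop hnow
    have hi : i < l.length := by
      by_contra h
      have : l.drop i = [] := List.drop_eq_nil_of_le (by omega)
      simp [this] at hdrop
    have hget : l.getD i 0 = v := by
      have h0 : (l.drop i)[0]? = l[i]? := by simp [List.getElem?_drop]
      rw [hdrop] at h0
      simp at h0
      simp [List.getD, h0.symm]
    have hdrop' : l.drop (i + 1) = rest' := by
      rw [← List.tail_drop, hdrop]
      rfl
    have hlast : (i = l.length - 1) ↔ rest' = [] := by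
      constructor
      · intro h
        have : l.drop (i+1) = [] := List.drop_eq_nil_of_le (by omega)
        rw [hdrop'] at this; exact this
      · intro h
        rw [h] at hdrop'
        have := List.drop_eq_nil_iff.mp hdrop'
        omega
    rw [goA]
    simp only [hi, dif_pos, hget]
    by_cases hv : v = 0
    · -- zero element: flush `now` (if non-empty), continue with empty buffer
      subst hv
      simp only [ne_eq, not_true_eq_false, if_false, true_or, if_pos, runsB, ite_not]
      by_cases hn : now = []
      · subst hn
        simp only [ne_eq, not_true_eq_false, if_false, if_pos, List.nil_append, ite_self]
        exact ih (i+1) res [] single more hdrop' (fun _ => rfl)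
      · simp only [hn, if_false, ne_eq, not_false_eq_true, if_true, if_neg hn,
          List.singleton_append, takeRunsB]
        split
        · rfl
        · exact ih (i+1) _ [] _ _ hdrop' (fun _ => rfl)
    · -- non-zero element: extend the buffer
      simp only [ne_eq, hv, not_false_eq_true, if_true, runsB, if_neg hv]
      by_cases hl : rest' = []
      · -- last index: flush the (non-empty) extended buffer
        have hlasti : i = l.length - 1 := hlast.mpr hl
        have hne : ¬ now ++ [PySem.Int.toStr (i : Int)] = [] := by simp
        subst hl
        rw [if_pos (Or.inr hlasti), if_pos hne, runsB, if_neg hne, takeRunsB]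
        split
        · rfl
        · rw [goA]
          have h2 : ¬ i + 1 < l.length := by omega
          rw [dif_neg h2, takeRunsB]
      · -- middle of a run: just recurse
        have hlasti : ¬ i = l.length - 1 := fun h => hl (hlast.mp h)
        simp only [hv, hlasti, or_false, if_false]
        exact ih (i+1) res _ single more hdrop' (fun h => absurd h hl)

-- ===== VERDICT (by name: the statement is the Claim_ definition above) =====
theorem getKeyphraseList_top_spec : Claim_equal_getKeyphraseList_top := by
  intro l top_num _
  unfold Spec_getKeyphraseList_top getKeyphraseList_top getKeyphraseList_top_alt
  rw [goA_eq_takeRunsB l top_num l 0 [] [] [] [] (by simp) (by intro h; rfl)]
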